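-- pv_equiv track=rewrite | github.com/jyo925/Algorithm-Study-python | section6/6-9.py | check
-- ===== SOURCE A (Python) =====
-- def check(x):
--     y = []
--     while True:
--         if len(x) == 1:
--             break
--         for i in range(len(x) - 1):
--             y.append(x[i] + x[i + 1])
--         x = y
--         y = []
--     return x[0]
-- ===== SOURCE B (Python) =====
-- def check(x):
--     # Closed form: the repeated adjacent-sum collapse yields sum(C(n-1,i)*x[i]).
--     n = len(x)
--     total = 0
--     c = 1
--     i = 0
--     for v in x:
--         total += c * v
--         c = c * (n - 1 - i) // (i + 1)
--         i += 1
--     return total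
-- ===== Notes on version B (the rewrite author's own statement) =====
-- stated objective: faster
-- what changed: Replaced the O(n^2) repeated adjacent-sum collapse with a single pass computing the binomial-weighted sum sum(C(n-1,i)*x[i]) with incrementally updated coefficients.
import Mathlib
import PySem

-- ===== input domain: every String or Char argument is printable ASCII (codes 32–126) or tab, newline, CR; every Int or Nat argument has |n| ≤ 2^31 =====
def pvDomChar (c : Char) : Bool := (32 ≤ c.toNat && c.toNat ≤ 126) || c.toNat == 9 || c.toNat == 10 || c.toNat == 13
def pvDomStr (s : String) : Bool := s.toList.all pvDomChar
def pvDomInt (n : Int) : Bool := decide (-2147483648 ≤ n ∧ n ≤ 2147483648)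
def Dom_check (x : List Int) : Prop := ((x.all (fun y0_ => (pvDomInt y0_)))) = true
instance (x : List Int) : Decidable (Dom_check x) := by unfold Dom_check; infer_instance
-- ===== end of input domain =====

-- B replaces A's O(n^2) repeated adjacent-sum collapse by a one-pass binomial-weighted
-- sum Σ C(n-1,i)·x[i] with incrementally updated coefficients (objective: faster).

-- ===== PORT A =====
-- helper: one pass of A's inner for-loop (y.append(x[i] + x[i+1]) for i < len(x)-1)
def adjStep : List Int → List Int
  | a :: b :: t => (a + b) :: adjStep (b :: t)
  | _ => []

theorem adjStep_length (x : List Int) : (adjStep x).length = x.length - 1 := by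
  match x with
  | a :: b :: t =>
    have := adjStep_length (b :: t)
    simp [adjStep] at this ⊢
    omega
  | [] => simp [adjStep]
  | [a] => simp [adjStep]

-- A's while-loop: collapse until one element remains, then return x[0].
-- On [] the Python loops forever (excluded by Pre_check); the port returns 0 there.
def check (x : List Int) : Int :=
  if x.length = 1 then x.headD 0
  else if x.length < 1 then 0
  else check (adjStep x)
termination_by x.length
decreasing_by simp [adjStep_length]; omega

-- ===== PORT B =====
def check_alt (x : List Int) : Int :=
  let n : Int := x.length
  (x.foldl (fun (s : Int × Int × Int) v =>
      (s.1 + s.2.1 * v,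
       PySem.Int.floordiv (s.2.1 * (n - 1 - s.2.2)) (s.2.2 + 1),
       s.2.2 + 1)) (0, 1, 0)).1

-- ===== PRECONDITION & SPEC =====
-- Pre_check excludes only the empty list, on which A's while-loop never terminates.
def Pre_check (x : List Int) : Prop := x ≠ []
instance (x : List Int) : Decidable (Pre_check x) := by unfold Pre_check; infer_instance
def pvWitness_check : List Int := [1, 2, 3]

def Spec_check (x : List Int) (out : Int) : Prop := out = check_alt x
instance (x : List Int) (out : Int) : Decidable (Spec_check x out) := by unfold Spec_check; infer_instance

-- ===== CLAIM (what is proved, stated in full; the proofs are below) =====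
def Claim_equal_check : Prop := ∀ (x : List Int), Dom_check x → Pre_check x → Spec_check x (check x)

-- ===== LEMMAS AND PROOFS =====

-- the common mathematical value: the binomial-weighted sum of x against row n
def wsum (n : ℕ) (x : List Int) : Int :=
  ∑ i ∈ Finset.range x.length, ((n.choose i : ℕ) : Int) * x.getD i 0

theorem adjStep_getD : ∀ (x : List Int) (i : ℕ), i + 1 < x.length →
    (adjStep x).getD i 0 = x.getD i 0 + x.getD (i + 1) 0
  | a :: b :: t, 0, _ => by simp [adjStep]
  | a :: b :: t, i + 1, h => by
      have ih := adjStep_getD (b :: t) i (by simp at h ⊢; omega)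
      simpa [adjStep] using ih
  | [], i, h => by exact absurd h (by simp)
  | [a], i, h => by exact absurd h (by simp)

-- Pascal step: one adjacent-sum pass lowers the row index by one.
theorem wsum_adjStep (x : List Int) (k : ℕ) (h : x.length = k + 2) :
    wsum k (adjStep x) = wsum (k + 1) x := by
  have hlen : (adjStep x).length = k + 1 := by rw [adjStep_length, h]; omega
  unfold wsum
  rw [hlen, h]
  have hL : ∑ i ∈ Finset.range (k + 1), ((k.choose i : ℕ) : Int) * (adjStep x).getD i 0
      = ∑ i ∈ Finset.range (k + 1),
          (((k.choose i : ℕ) : Int) * x.getD i 0 + ((k.choose i : ℕ) : Int) * x.getD (i + 1) 0) := by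
    refine Finset.sum_congr rfl fun i hi => ?_
    rw [adjStep_getD x i (by simp at hi; omega)]; ring
  rw [hL, Finset.sum_add_distrib]
  have h2 : k + 2 = k + 1 + 1 := by omega
  rw [h2]
  rw [Finset.sum_range_succ' (fun j => (((k+1).choose j : ℕ) : Int) * x.getD j 0) (k+1)]
  rw [Finset.sum_range_succ' (fun j => ((k.choose j : ℕ) : Int) * x.getD j 0) k]
  have hext : ∑ j ∈ Finset.range k, ((k.choose (j+1) : ℕ) : Int) * x.getD (j+1) 0
      = ∑ j ∈ Finset.range (k+1), ((k.choose (j+1) : ℕ) : Int) * x.getD (j+1) 0 := by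
    rw [Finset.sum_range_succ, Nat.choose_eq_zero_of_lt (Nat.lt_succ_self k)]
    simp
  rw [hext]
  have hP : ∑ j ∈ Finset.range (k+1), (((k+1).choose (j+1) : ℕ) : Int) * x.getD (j+1) 0
      = ∑ j ∈ Finset.range (k+1), ((k.choose (j+1) : ℕ) : Int) * x.getD (j+1) 0
        + ∑ j ∈ Finset.range (k+1), ((k.choose j : ℕ) : Int) * x.getD (j+1) 0 := by
    rw [← Finset.sum_add_distrib]
    refine Finset.sum_congr rfl fun j _ => ?_
    rw [Nat.choose_succ_succ]
    push_cast; ring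
  rw [hP]
  simp only [Nat.choose_zero_right]
  ring

-- A equals the binomial-weighted sum, by strong induction on the length.
theorem check_eq_wsum : ∀ (n : ℕ) (x : List Int), x.length = n → 1 ≤ n →
    check x = wsum (n - 1) x := by
  intro n
  induction n using Nat.strong_induction_on with
  | _ n ih =>
    intro x hlen hn
    rcases Nat.lt_or_ge n 2 with hs | hs
    · interval_cases n
      cases x with
      | nil => exact absurd hlen (by simp)
      | cons a t =>
        cases t with
        | nil => simp [check, wsum]
        | cons b u => exact absurd hlen (by simp)
    · rw [check, hlen, if_neg (by omega : ¬ n = 1), if_neg (by omega : ¬ n < 1)]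
      have hadj : (adjStep x).length = n - 1 := by rw [adjStep_length, hlen]
      rw [ih (n - 1) (by omega) (adjStep x) hadj (by omega)]
      obtain ⟨k, rfl⟩ : ∃ k, n = k + 2 := ⟨n - 2, by omega⟩
      have e1 : k + 2 - 1 - 1 = k := by omega
      have e2 : k + 2 - 1 = k + 1 := by omega
      rw [e1, e2]
      exact wsum_adjStep x k hlen

theorem choose_step (n i : ℕ) (hi : i < n) :
    PySem.Int.floordiv ((((n - 1).choose i : ℕ) : Int) * ((n : Int) - 1 - i)) ((i : Int) + 1)
      = (((n - 1).choose (i + 1) : ℕ) : Int) := by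
  have hc : (n - 1).choose (i + 1) * (i + 1) = (n - 1).choose i * ((n - 1) - i) :=
    Nat.choose_succ_right_eq (n - 1) i
  have h1 : ((n : Int) - 1 - i) = ((n - 1 - i : ℕ) : Int) := by omega
  have hmul : (((n - 1).choose i : ℕ) : Int) * ((n : Int) - 1 - i)
      = (((n - 1).choose (i + 1) : ℕ) : Int) * ((i : Int) + 1) := by
    rw [h1]
    exact_mod_cast hc.symm
  rw [hmul, PySem.Int.floordiv_eq_ediv_of_pos (by omega)]
  exact Int.mul_ediv_cancel _ (by omega)

-- loop invariant for B's single pass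
theorem fold_inv (n : ℕ) : ∀ (l : List Int) (i : ℕ) (acc : Int), i + l.length = n →
    (l.foldl (fun (s : Int × Int × Int) v =>
      (s.1 + s.2.1 * v,
       PySem.Int.floordiv (s.2.1 * ((n : Int) - 1 - s.2.2)) (s.2.2 + 1),
       s.2.2 + 1)) (acc, (((n - 1).choose i : ℕ) : Int), (i : Int))).1
    = acc + ∑ j ∈ Finset.range l.length, (((n - 1).choose (i + j) : ℕ) : Int) * l.getD j 0 := by
  intro l
  induction l with
  | nil => intro i acc _; simp
  | cons v t iht =>
    intro i acc hlen
    have hi : i < n := by simp at hlen; omega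
    simp only [List.foldl_cons]
    rw [choose_step n i hi]
    have hcast : ((i : Int) + 1) = ((i + 1 : ℕ) : Int) := by push_cast; ring
    rw [hcast]
    rw [iht (i + 1) (acc + (((n - 1).choose i : ℕ) : Int) * v) (by simp at hlen ⊢; omega)]
    simp only [List.length_cons]
    rw [Finset.sum_range_succ'
      (fun j => (((n - 1).choose (i + j) : ℕ) : Int) * (v :: t).getD j 0) t.length]
    simp only [List.getD_cons_succ, List.getD_cons_zero, Nat.add_zero]
    have hidx : ∑ j ∈ Finset.range t.length, (((n - 1).choose (i + (j + 1)) : ℕ) : Int) * t.getD j 0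
        = ∑ j ∈ Finset.range t.length, (((n - 1).choose (i + 1 + j) : ℕ) : Int) * t.getD j 0 := by
      refine Finset.sum_congr rfl fun j _ => ?_
      rw [show i + (j + 1) = i + 1 + j by omega]
    rw [hidx]
    ring

theorem check_alt_eq_wsum (x : List Int) : check_alt x = wsum (x.length - 1) x := by
  unfold check_alt wsum
  have h := fold_inv x.length x 0 0 (by simp)
  simpa using h

-- ===== VERDICT (by name: the statement is the Claim_ definition above) =====
theorem check_spec : Claim_equal_check := by
  intro x _ hpre
  unfold Spec_check
  have hlen : 1 ≤ x.length := by
    cases x with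
    | nil => exact absurd rfl hpre
    | cons a t => simp
  rw [check_eq_wsum x.length x rfl hlen, check_alt_eq_wsum]
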